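-- pv_equiv track=rewrite | github.com/TenmaGabriel0721/astrbot_plugin_whitelistpro | main.py | _match_whitelist
-- ===== SOURCE A (Python) =====
-- def _match_whitelist(whitelist: list, user_id: str = None, group_id: str = None,
--                     unified_msg_origin: str = None) -> bool:
--     """检查是否在白名单中，支持多种格式匹配
--
--     匹配逻辑：
--     1. 直接匹配完整的 unified_msg_origin（如 qq:FriendMessage:12345678）
--     2. 匹配用户ID（QQ号），适用于私聊
--     3. 匹配群ID（QQ群号），适用于群聊
--     4. 匹配带前缀的格式（如 qq:FriendMessage:12345678），提取ID部分匹配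
--     5. 对于纯数字输入，从 unified_msg_origin 中解析 platform_id 和 message_type，然后匹配
--     """
--     if not whitelist:
--         return False
--
--     user_id = str(user_id).strip() if user_id else None
--     group_id = str(group_id).strip() if group_id else None
--
--     # 解析 unified_msg_origin 获取平台ID和消息类型
--     platform_id = None
--     message_type = None
--     session_id_from_origin = None
--     if unified_msg_origin:
--         try:
--             parts = unified_msg_origin.split(":")
--             if len(parts) >= 3:
--                 platform_id = parts[0]
--                 message_type = parts[1]
--                 session_id_from_origin = parts[2]
--         except Exception:
--             pass
--
--     for item in whitelist:
--         item = str(item).strip()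
--         if not item:
--             continue
--
--         # 1. 直接匹配完整会话ID
--         if unified_msg_origin and item == unified_msg_origin:
--             return True
--
--         # 2. 匹配用户ID（QQ号）- 适用于私聊
--         if user_id and item == user_id:
--             return True
--
--         # 3. 匹配群ID（QQ群号）- 适用于群聊
--         if group_id and item == group_id:
--             return True
--
--         # 4. 匹配带前缀的格式（如 qq:FriendMessage:12345678）
--         if ":" in item:
--             try:
--                 parts = item.split(":")
--                 if len(parts) >= 3:
--                     # 提取ID部分进行匹配
--                     item_id = parts[-1]
--                     # 匹配用户ID
--                     if user_id and item_id == user_id: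
--                         return True
--                     # 匹配群ID
--                     if group_id and item_id == group_id:
--                         return True
--                     # 如果 session_id_from_origin 存在，也尝试匹配
--                     if session_id_from_origin and item_id == session_id_from_origin:
--                         return True
--             except Exception:
--                 pass
--         else:
--             # 5. 纯数字输入，直接匹配 session_id、user_id 和 group_id
--             # unified_msg_origin 格式为 platform_id:message_type:session_id
--             # 对于私聊，session_id 通常是用户ID
--             # 对于群聊，session_id 可能是群号，也可能是 user_id_group_id（如果 unique_session 开启）
--             # 因此我们需要同时匹配 user_id、group_id 和 session_id_from_origin
--             # 这样无论用户输入的是QQ号还是群号，都能正确匹配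
--             if session_id_from_origin and item == session_id_from_origin:
--                 return True
--             # 匹配 user_id（适用于私聊，或者 unique_session 开启时的群聊）
--             if user_id and item == user_id:
--                 return True
--             # 匹配 group_id（适用于群聊，即使 unique_session 开启，group_id 也是独立的）
--             if group_id and item == group_id:
--                 return True
--
--     return False
-- ===== SOURCE B (Python) =====
-- def _match_whitelist(whitelist: list, user_id: str = None, group_id: str = None,
--                      unified_msg_origin: str = None) -> bool:
--     user_id = str(user_id).strip() if user_id else None
--     group_id = str(group_id).strip() if group_id else None
--
--     session_id_from_origin = None
--     if unified_msg_origin: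
--         parts = unified_msg_origin.split(":")
--         if len(parts) >= 3:
--             session_id_from_origin = parts[2]
--
--     # One pass: index the whitelist into three sets, then answer with membership tests.
--     full_items = set()      # every nonempty stripped item
--     noncolon_items = set()  # items without ':'
--     id_parts = set()        # parts[-1] of items with >= 3 ':'-separated parts
--     for raw in whitelist:
--         item = str(raw).strip()
--         if not item:
--             continue
--         full_items.add(item)
--         if ":" in item:
--             parts = item.split(":")
--             if len(parts) >= 3:
--                 id_parts.add(parts[-1])
--         else:
--             noncolon_items.add(item)
--
--     if unified_msg_origin and unified_msg_origin in full_items: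
--         return True
--     if user_id and (user_id in full_items or user_id in id_parts):
--         return True
--     if group_id and (group_id in full_items or group_id in id_parts):
--         return True
--     if session_id_from_origin and (session_id_from_origin in id_parts
--                                    or session_id_from_origin in noncolon_items):
--         return True
--     return False
-- ===== Notes on version B (the rewrite author's own statement) =====
-- stated objective: alternative
-- what changed: Replaces A's per-item multi-branch early-return loop with one indexing pass that builds three sets (full items, non-colon items, id parts of 3-part colon items) followed by four constant-shape membership queries.
import Mathlib
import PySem

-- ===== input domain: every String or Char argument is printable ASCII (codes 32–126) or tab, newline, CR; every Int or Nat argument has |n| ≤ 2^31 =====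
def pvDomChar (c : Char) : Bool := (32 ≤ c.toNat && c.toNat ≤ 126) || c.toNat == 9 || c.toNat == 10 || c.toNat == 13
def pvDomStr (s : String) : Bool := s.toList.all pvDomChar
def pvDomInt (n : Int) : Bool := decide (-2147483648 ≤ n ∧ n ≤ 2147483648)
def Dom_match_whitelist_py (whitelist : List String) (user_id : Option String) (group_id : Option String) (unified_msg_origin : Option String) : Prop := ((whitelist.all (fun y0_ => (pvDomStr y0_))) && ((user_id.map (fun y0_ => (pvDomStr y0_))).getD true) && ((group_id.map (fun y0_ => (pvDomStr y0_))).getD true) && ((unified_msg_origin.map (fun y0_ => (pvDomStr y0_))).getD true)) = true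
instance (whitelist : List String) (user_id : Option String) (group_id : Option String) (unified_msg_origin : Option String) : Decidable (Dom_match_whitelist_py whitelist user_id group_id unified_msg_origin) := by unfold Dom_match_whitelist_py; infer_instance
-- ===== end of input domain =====

-- B replaces A's per-item multi-branch early-return loop by one indexing pass building three
-- sets (full items / non-colon items / id parts) followed by four membership queries (objective: alternative).

-- ===== PORT A =====

-- s.split(":") — split? is none only for an empty separator, so getD is never taken
def pvSplitColon (s : String) : List String := (PySem.Str.split? s ":").getD []

-- "o and item == o" for an Optional[str] o (falsy = None or "")
def pvTruthMatch (o : Option String) (item : String) : Bool :=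
  match o with
  | some s => (s != "") && (item == s)
  | none => false

-- user_id = str(user_id).strip() if user_id else None   (shared line of both Pythons)
def pvNorm (o : Option String) : Option String :=
  match o with
  | some s => if s == "" then none else some (PySem.Str.strip s)
  | none => none

-- session_id_from_origin parsed from unified_msg_origin  (shared lines of both Pythons)
def pvSid (uo : Option String) : Option String :=
  match uo with
  | some s =>
      if s == "" then none
      else
        let parts := pvSplitColon s
        if 3 ≤ parts.length then some (parts.getD 2 "") else none
  | none => none

-- the for-loop of A with its early returns
def pvLoopA (uo user group sid : Option String) : List String → Bool
  | [] => false
  | it :: rest =>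
    let item := PySem.Str.strip it
    if item == "" then pvLoopA uo user group sid rest
    else if pvTruthMatch uo item then true
    else if pvTruthMatch user item then true
    else if pvTruthMatch group item then true
    else if PySem.Str.isIn ":" item then
      let parts := pvSplitColon item
      if 3 ≤ parts.length then
        let itemId := parts.getLastD ""
        if pvTruthMatch user itemId then true
        else if pvTruthMatch group itemId then true
        else if pvTruthMatch sid itemId then true
        else pvLoopA uo user group sid rest
      else pvLoopA uo user group sid rest
    else
      if pvTruthMatch sid item then true
      else if pvTruthMatch user item then true
      else if pvTruthMatch group item then true
      else pvLoopA uo user group sid rest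

def match_whitelist_py (whitelist : List String) (user_id : Option String) (group_id : Option String) (unified_msg_origin : Option String) : Bool :=
  if whitelist.isEmpty then false
  else
    pvLoopA unified_msg_origin (pvNorm user_id) (pvNorm group_id) (pvSid unified_msg_origin) whitelist

-- ===== PORT B =====

-- the loop body of B's single indexing pass: add the item to (full_items, noncolon_items, id_parts)
def pvStep (acc : PySem.Set String × PySem.Set String × PySem.Set String) (raw : String) :
    PySem.Set String × PySem.Set String × PySem.Set String :=
  let item := PySem.Str.strip raw
  if item == "" then acc
  else
    let full := PySem.Set.add acc.1 item
    if PySem.Str.isIn ":" item then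
      let parts := pvSplitColon item
      if 3 ≤ parts.length then (full, acc.2.1, PySem.Set.add acc.2.2 (parts.getLastD ""))
      else (full, acc.2.1, acc.2.2)
    else (full, PySem.Set.add acc.2.1 item, acc.2.2)

-- one pass over the whitelist building (full_items, noncolon_items, id_parts)
def pvBuild (wl : List String) : PySem.Set String × PySem.Set String × PySem.Set String :=
  wl.foldl pvStep (PySem.Set.empty, PySem.Set.empty, PySem.Set.empty)

-- "o and o in s"
def pvOptIn (o : Option String) (s : PySem.Set String) : Bool :=
  match o with
  | some x => (x != "") && PySem.Set.contains s x
  | none => false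

def match_whitelist_py_alt (whitelist : List String) (user_id : Option String) (group_id : Option String) (unified_msg_origin : Option String) : Bool :=
  let user := pvNorm user_id
  let group := pvNorm group_id
  let sid := pvSid unified_msg_origin
  let sets := pvBuild whitelist
  let full := sets.1
  let noncolon := sets.2.1
  let idparts := sets.2.2
  if pvOptIn unified_msg_origin full then true
  else if pvOptIn user full || pvOptIn user idparts then true
  else if pvOptIn group full || pvOptIn group idparts then true
  else if pvOptIn sid idparts || pvOptIn sid noncolon then true
  else false

-- ===== PRECONDITION & SPEC =====
def Spec_match_whitelist_py (whitelist : List String) (user_id : Option String) (group_id : Option String) (unified_msg_origin : Option String) (out : Bool) : Prop := out = match_whitelist_py_alt whitelist user_id group_id unified_msg_origin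
instance (whitelist : List String) (user_id : Option String) (group_id : Option String) (unified_msg_origin : Option String) (out : Bool) : Decidable (Spec_match_whitelist_py whitelist user_id group_id unified_msg_origin out) := by unfold Spec_match_whitelist_py; infer_instance

-- ===== CLAIM (what is proved, stated in full; the proofs are below) =====
def Claim_equal_match_whitelist_py : Prop := ∀ (whitelist : List String) (user_id : Option String) (group_id : Option String) (unified_msg_origin : Option String), Dom_match_whitelist_py whitelist user_id group_id unified_msg_origin → Spec_match_whitelist_py whitelist user_id group_id unified_msg_origin (match_whitelist_py whitelist user_id group_id unified_msg_origin)

-- ===== LEMMAS AND PROOFS =====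

set_option maxHeartbeats 1000000

theorem pvTruthMatch_empty (o : Option String) : pvTruthMatch o "" = false := by
  cases o with
  | none => rfl
  | some s =>
      simp only [pvTruthMatch, Bool.and_eq_false_iff, bne_eq_false_iff_eq, beq_eq_false_iff_ne]
      by_cases h : s = "" <;> simp [h]

theorem pvTruthMatch_ne_empty {o : Option String} {item : String}
    (h : pvTruthMatch o item = true) : item ≠ "" := by
  intro he; rw [he, pvTruthMatch_empty] at h; exact absurd h (by simp)

-- per-item hit predicate: A's loop body returns true on this item
def pvHit (uo user group sid : Option String) (it : String) : Bool :=
  let item := PySem.Str.strip it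
  (item != "") &&
    (pvTruthMatch uo item || pvTruthMatch user item || pvTruthMatch group item ||
      (if PySem.Str.isIn ":" item then
        (let parts := pvSplitColon item
         if 3 ≤ parts.length then
           pvTruthMatch user (parts.getLastD "") || pvTruthMatch group (parts.getLastD "") ||
             pvTruthMatch sid (parts.getLastD "")
         else false)
       else pvTruthMatch sid item))

theorem pvLoopA_eq_any (uo user group sid : Option String) (wl : List String) :
    pvLoopA uo user group sid wl = wl.any (pvHit uo user group sid) := by
  induction wl with
  | nil => rfl
  | cons it rest ih =>
      simp only [pvLoopA, pvHit, List.any_cons, ih]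
      split_ifs <;> simp_all

-- the three per-item checks B's sets answer: full-item match, id-part match, non-colon match
def pvChkFull (o : Option String) (it : String) : Bool :=
  pvTruthMatch o (PySem.Str.strip it)

def pvChkId (o : Option String) (it : String) : Bool :=
  let item := PySem.Str.strip it
  (item != "") && (PySem.Str.isIn ":" item && decide (3 ≤ (pvSplitColon item).length)) &&
    pvTruthMatch o ((pvSplitColon item).getLastD "")

def pvChkNC (o : Option String) (it : String) : Bool :=
  let item := PySem.Str.strip it
  (item != "") && !(PySem.Str.isIn ":" item) && pvTruthMatch o item

-- pvHit, regrouped into B's seven independent checks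
theorem pvHit_eq_checks (uo user group sid : Option String) (it : String) :
    pvHit uo user group sid it =
      (pvChkFull uo it || (pvChkFull user it || pvChkId user it) ||
        (pvChkFull group it || pvChkId group it) || (pvChkId sid it || pvChkNC sid it)) := by
  simp only [pvHit, pvChkFull, pvChkId, pvChkNC]
  generalize PySem.Str.strip it = item
  have h1 := @pvTruthMatch_ne_empty uo item
  have h2 := @pvTruthMatch_ne_empty user item
  have h3 := @pvTruthMatch_ne_empty group item
  have h4 := @pvTruthMatch_ne_empty sid item
  generalize PySem.Str.isIn ":" item = c
  generalize pvSplitColon item = ps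
  rw [Bool.eq_iff_iff]
  cases c <;> by_cases hL : (3:Nat) ≤ ps.length <;>
    (simp [hL, bne_iff_ne]; tauto)

-- what one pvStep does to each of the three set components
theorem pvStep_full (acc : PySem.Set String × PySem.Set String × PySem.Set String)
    (it x : String) :
    (x ∈ (pvStep acc it).1 ↔ x ∈ acc.1 ∨ (PySem.Str.strip it = x ∧ x ≠ "")) := by
  simp only [pvStep]
  split_ifs with h1 h2 h3 <;> simp_all [PySem.Set.mem_add] <;> aesop

theorem pvStep_noncolon (acc : PySem.Set String × PySem.Set String × PySem.Set String)
    (it x : String) :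
    (x ∈ (pvStep acc it).2.1 ↔ x ∈ acc.2.1 ∨
      (PySem.Str.strip it = x ∧ x ≠ "" ∧ PySem.Str.isIn ":" x = false)) := by
  simp only [pvStep]
  split_ifs with h1 h2 h3 <;> simp_all [PySem.Set.mem_add] <;> aesop

theorem pvStep_idparts (acc : PySem.Set String × PySem.Set String × PySem.Set String)
    (it x : String) :
    (x ∈ (pvStep acc it).2.2 ↔ x ∈ acc.2.2 ∨
      (PySem.Str.strip it ≠ "" ∧ PySem.Str.isIn ":" (PySem.Str.strip it) = true ∧
        3 ≤ (pvSplitColon (PySem.Str.strip it)).length ∧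
        (pvSplitColon (PySem.Str.strip it)).getLastD "" = x)) := by
  simp only [pvStep]
  split_ifs with h1 h2 h3 <;> simp_all [PySem.Set.mem_add] <;> aesop

-- membership in the three sets built by the fold, relative to any accumulator
theorem pvFold_full (wl : List String)
    (acc : PySem.Set String × PySem.Set String × PySem.Set String) (x : String) :
    (x ∈ (wl.foldl pvStep acc).1 ↔
      x ∈ acc.1 ∨ ∃ it ∈ wl, PySem.Str.strip it = x ∧ x ≠ "") := by
  induction wl generalizing acc with
  | nil => simp
  | cons it rest ih =>
      rw [List.foldl_cons, ih, pvStep_full]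
      simp only [List.exists_mem_cons_iff]
      tauto

theorem pvFold_noncolon (wl : List String)
    (acc : PySem.Set String × PySem.Set String × PySem.Set String) (x : String) :
    (x ∈ (wl.foldl pvStep acc).2.1 ↔
      x ∈ acc.2.1 ∨ ∃ it ∈ wl, PySem.Str.strip it = x ∧ x ≠ "" ∧ PySem.Str.isIn ":" x = false) := by
  induction wl generalizing acc with
  | nil => simp
  | cons it rest ih =>
      rw [List.foldl_cons, ih, pvStep_noncolon]
      simp only [List.exists_mem_cons_iff]
      tauto

theorem pvFold_idparts (wl : List String)
    (acc : PySem.Set String × PySem.Set String × PySem.Set String) (x : String) :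
    (x ∈ (wl.foldl pvStep acc).2.2 ↔
      x ∈ acc.2.2 ∨ ∃ it ∈ wl, PySem.Str.strip it ≠ "" ∧
        PySem.Str.isIn ":" (PySem.Str.strip it) = true ∧
        3 ≤ (pvSplitColon (PySem.Str.strip it)).length ∧
        (pvSplitColon (PySem.Str.strip it)).getLastD "" = x) := by
  induction wl generalizing acc with
  | nil => simp
  | cons it rest ih =>
      rw [List.foldl_cons, ih, pvStep_idparts]
      simp only [List.exists_mem_cons_iff]
      exact or_assoc

-- Set.contains is membership
theorem pvContains_iff (s : PySem.Set String) (x : String) :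
    PySem.Set.contains s x = true ↔ x ∈ s := by
  simp [PySem.Set.contains]

-- the membership queries of B, as any-over-the-whitelist facts
theorem pvOptIn_full (o : Option String) (wl : List String) :
    pvOptIn o (pvBuild wl).1 = wl.any (pvChkFull o) := by
  cases o with
  | none => simp [pvOptIn, pvChkFull, pvTruthMatch]
  | some s =>
      rw [Bool.eq_iff_iff]
      simp only [pvOptIn, pvBuild, Bool.and_eq_true, pvContains_iff, pvFold_full wl _ s,
        List.any_eq_true, pvChkFull, pvTruthMatch, bne_iff_ne, ne_eq, beq_iff_eq]
      aesop

theorem pvOptIn_idparts (o : Option String) (wl : List String) :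
    pvOptIn o (pvBuild wl).2.2 = wl.any (pvChkId o) := by
  cases o with
  | none => simp [pvOptIn, pvChkId, pvTruthMatch]
  | some s =>
      rw [Bool.eq_iff_iff]
      simp only [pvOptIn, pvBuild, Bool.and_eq_true, pvContains_iff, pvFold_idparts wl _ s,
        List.any_eq_true, pvChkId, pvTruthMatch, bne_iff_ne, ne_eq, beq_iff_eq,
        decide_eq_true_eq]
      aesop

theorem pvOptIn_noncolon (o : Option String) (wl : List String) :
    pvOptIn o (pvBuild wl).2.1 = wl.any (pvChkNC o) := by
  cases o with
  | none => simp [pvOptIn, pvChkNC, pvTruthMatch]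
  | some s =>
      rw [Bool.eq_iff_iff]
      simp only [pvOptIn, pvBuild, Bool.and_eq_true, pvContains_iff, pvFold_noncolon wl _ s,
        List.any_eq_true, pvChkNC, pvTruthMatch, bne_iff_ne, ne_eq, beq_iff_eq,
        Bool.not_eq_true']
      aesop

-- any over pvHit splits into the seven independent any-checks
theorem pvAny_hit (uo user group sid : Option String) (wl : List String) :
    wl.any (pvHit uo user group sid) =
      (wl.any (pvChkFull uo) || (wl.any (pvChkFull user) || wl.any (pvChkId user)) ||
        (wl.any (pvChkFull group) || wl.any (pvChkId group)) ||
        (wl.any (pvChkId sid) || wl.any (pvChkNC sid))) := by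
  induction wl with
  | nil => rfl
  | cons a l ih =>
      simp only [List.any_cons, ih, pvHit_eq_checks]
      generalize pvChkFull uo a = a1
      generalize pvChkFull user a = a2
      generalize pvChkId user a = a3
      generalize pvChkFull group a = a4
      generalize pvChkId group a = a5
      generalize pvChkId sid a = a6
      generalize pvChkNC sid a = a7
      generalize l.any (pvChkFull uo) = b1
      generalize l.any (pvChkFull user) = b2
      generalize l.any (pvChkId user) = b3
      generalize l.any (pvChkFull group) = b4
      generalize l.any (pvChkId group) = b5
      generalize l.any (pvChkId sid) = b6
      generalize l.any (pvChkNC sid) = b7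
      rw [Bool.eq_iff_iff]
      simp only [Bool.or_eq_true]
      tauto

theorem pvOptIn_empty (o : Option String) : pvOptIn o ([] : PySem.Set String) = false := by
  cases o <;> simp [pvOptIn, PySem.Set.contains]

theorem pvMain (wl : List String) (user_id group_id unified_msg_origin : Option String) :
    match_whitelist_py wl user_id group_id unified_msg_origin =
      match_whitelist_py_alt wl user_id group_id unified_msg_origin := by
  cases wl with
  | nil =>
      simp [match_whitelist_py, match_whitelist_py_alt, pvBuild, pvOptIn_empty]
  | cons a l =>
      rw [match_whitelist_py, if_neg (by simp)]
      rw [pvLoopA_eq_any, pvAny_hit]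
      rw [← pvOptIn_full, ← pvOptIn_full, ← pvOptIn_full,
        ← pvOptIn_idparts, ← pvOptIn_idparts, ← pvOptIn_idparts, ← pvOptIn_noncolon]
      rw [match_whitelist_py_alt]
      rw [Bool.eq_iff_iff]
      simp only [Bool.or_eq_true]
      split_ifs <;> simp_all

-- ===== VERDICT (by name: the statement is the Claim_ definition above) =====
theorem match_whitelist_py_spec : Claim_equal_match_whitelist_py := by
  intro wl u g o _
  unfold Spec_match_whitelist_py
  exact pvMain wl u g o
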